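-- pv_equiv track=rewrite | github.com/iridwant/Ujian_UraiRajutKata | Soal-1.py | rajut
-- ===== SOURCE A (Python) =====
-- def rajut(kata):
--     counter     = 2
--     charLength  = len(kata)
--     index       = 0
--     result      = ''
--     while index < charLength:
--         result  += kata[index]
--         index   += counter
--         counter += 1
--     return result
-- ===== SOURCE B (Python) =====
-- def rajut(kata):
--     # Recursion on suffixes: take the first char of the remaining string,
--     # then slice away the current step and recurse with step+1.
--     def go(rest, step):
--         if not rest:
--             return ''
--         return rest[0] + go(rest[step:], step + 1)
--     return go(kata, 2)
-- ===== Notes on version B (the rewrite author's own statement) =====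
-- stated objective: alternative
-- what changed: Replaces A's index/counter arithmetic over the whole string by structural recursion on suffixes: each step consumes the head of the remaining string and slices away the current step, so no position index is ever maintained.
import Mathlib
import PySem

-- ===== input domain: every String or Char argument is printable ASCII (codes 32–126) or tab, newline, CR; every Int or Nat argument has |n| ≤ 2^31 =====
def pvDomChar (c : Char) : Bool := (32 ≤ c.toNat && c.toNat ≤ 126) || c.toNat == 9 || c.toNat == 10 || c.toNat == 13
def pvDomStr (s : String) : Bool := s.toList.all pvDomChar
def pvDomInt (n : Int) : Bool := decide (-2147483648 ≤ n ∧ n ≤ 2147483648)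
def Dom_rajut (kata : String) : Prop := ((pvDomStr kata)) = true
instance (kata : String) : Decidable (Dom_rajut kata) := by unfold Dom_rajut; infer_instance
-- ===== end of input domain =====

-- B replaces A's index/counter bookkeeping by structural recursion on suffixes
-- (consume head, slice away the step, recurse); equivalence is proved by relating
-- A's running index to the dropped suffix.

-- ===== PORT A =====
-- A's while loop; the counter is represented as c+2 (it starts at 2 and only grows),
-- which makes termination by the measure n - index evident. The in-range access
-- kata[index] is List.getD (index < n is the loop guard).
def rajutLoopA (kata : List Char) (n : Nat) (c : Nat) (index : Nat) : List Char :=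
  if h : index < n then
    kata.getD index ' ' :: rajutLoopA kata n (c + 1) (index + (c + 2))
  else []
termination_by n - index
decreasing_by omega

def rajut (kata : String) : String :=
  String.mk (rajutLoopA kata.toList kata.toList.length 0 0)

-- ===== PORT B =====
-- Source B's go(rest, step): the step is represented as s+2 (starts at 2, only grows).
-- rest[step:] on c :: t with step = s+2 is t.drop (s+1) (PySem slice with a
-- nonnegative in-range start = List.drop; exact here since step ≥ 2 ≥ 0).
def rajutGoB (rest : List Char) (s : Nat) : List Char :=
  match rest with
  | [] => []
  | c :: t => c :: rajutGoB (t.drop (s + 1)) (s + 1)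
termination_by rest.length
decreasing_by
  simp only [List.length_drop, List.length_cons]
  omega

def rajut_alt (kata : String) : String :=
  String.mk (rajutGoB kata.toList 0)

-- ===== PRECONDITION & SPEC =====
def Spec_rajut (kata : String) (out : String) : Prop := out = rajut_alt kata
instance (kata : String) (out : String) : Decidable (Spec_rajut kata out) := by unfold Spec_rajut; infer_instance

-- ===== CLAIM =====
def Claim_equal_rajut : Prop := ∀ (kata : String), Dom_rajut kata → Spec_rajut kata (rajut kata)

-- ===== LEMMAS AND PROOFS =====
-- A's loop at running index `index` computes exactly B's recursion on the suffix
-- kata.drop index, counters aligned (A's counter = c+2 = B's step = c+2).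
theorem rajut_loops_eq (kata : List Char) :
    ∀ (m c index : Nat), kata.length - index ≤ m →
      rajutLoopA kata kata.length c index = rajutGoB (kata.drop index) c := by
  intro m
  induction m with
  | zero =>
    intro c index h
    have hle : kata.length ≤ index := by omega
    rw [rajutLoopA, dif_neg (by omega), List.drop_eq_nil_of_le hle, rajutGoB]
  | succ m ih =>
    intro c index h
    rw [rajutLoopA]
    by_cases hidx : index < kata.length
    · rw [dif_pos hidx, List.drop_eq_getElem_cons hidx, rajutGoB]
      refine congrArg₂ List.cons ?_ ?_
      · exact List.getD_eq_getElem kata ' ' hidx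
      · rw [List.drop_drop, ih (c + 1) (index + (c + 2)) (by omega)]
        ring_nf
    · rw [dif_neg hidx, List.drop_eq_nil_of_le (by omega), rajutGoB]

-- ===== VERDICT =====
theorem rajut_spec : Claim_equal_rajut := by
  intro kata _
  unfold Spec_rajut rajut rajut_alt
  exact congrArg String.mk
    (by simpa using rajut_loops_eq kata.toList kata.toList.length 0 0 (by omega))
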